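-- pv_equiv track=rewrite | github.com/vigge93/AoC | 2022/day8.py | part_2
-- ===== SOURCE A (Python) =====
-- def part_2(data):
--     best_score = 0
--     for y, row in enumerate(data):
--         for x, tree in enumerate(row):
--             score = 1
--             for l in range(x-1, -1, -1): # Left
--                 if data[y][l] >= tree:
--                     score *= (x - l)
--                     break
--             else:
--                 score *= x
--             for r in range(x+1, len(row)): # Right
--                 if data[y][r] >= tree:
--                     score *= (r - x)
--                     break
--             else:
--                 score *= (len(row) - x - 1)
--             for u in range(y-1, -1, -1): # Up
--                 if data[u][x] >= tree:
--                     score *= (y - u)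
--                     break
--             else:
--                 score *= y
--             for d in range(y+1, len(data)): # Down
--                 if data[d][x] >= tree:
--                     score *= (d - y)
--                     break
--             else:
--                 score *= (len(data) - y - 1)
--             best_score = max(score, best_score)
--     return best_score
-- ===== SOURCE B (Python) =====
-- def part_2(data):
--     if not data:
--         return 0
--
--     def dists(xs):
--         # dists(xs)[i] = viewing distance towards the start of xs:
--         # i - j for the nearest j < i with xs[j] >= xs[i], else i.
--         stack = []  # (index, height), heights non-increasing bottom -> top
--         out = []
--         for i, h in enumerate(xs):
--             while stack and stack[-1][1] < h:
--                 stack.pop()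
--             out.append(i - stack[-1][0] if stack else i)
--             stack.append((i, h))
--         return out
--
--     w = len(data[0])
--     cols = [[row[x] for row in data] for x in range(w)]
--     left = [dists(row) for row in data]
--     right = [dists(row[::-1])[::-1] for row in data]
--     up = [dists(col) for col in cols]          # up[x][y]
--     down = [dists(col[::-1])[::-1] for col in cols]
--     best = 0
--     for y, row in enumerate(data):
--         for x in range(len(row)):
--             s = left[y][x] * right[y][x] * up[x][y] * down[x][y]
--             if s > best:
--                 best = s
--     return best
-- ===== Notes on version B (the rewrite author's own statement) =====
-- stated objective: faster
-- what changed: B precomputes four whole-grid viewing-distance tables with one monotonic-stack pass per row/column (and per reversed row/column) instead of A's four per-cell directional rescans, then takes the max of the per-cell products.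
import Mathlib
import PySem

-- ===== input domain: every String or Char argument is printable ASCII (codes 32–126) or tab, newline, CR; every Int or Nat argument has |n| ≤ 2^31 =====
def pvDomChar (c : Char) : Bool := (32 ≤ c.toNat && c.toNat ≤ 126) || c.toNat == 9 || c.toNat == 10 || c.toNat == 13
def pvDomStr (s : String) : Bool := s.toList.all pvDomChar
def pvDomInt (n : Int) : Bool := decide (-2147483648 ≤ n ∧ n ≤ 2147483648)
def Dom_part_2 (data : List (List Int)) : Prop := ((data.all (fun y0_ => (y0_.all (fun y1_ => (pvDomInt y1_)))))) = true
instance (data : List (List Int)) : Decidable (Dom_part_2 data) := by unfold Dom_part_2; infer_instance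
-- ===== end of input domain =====

-- B replaces A's four per-cell directional rescans by monotonic-stack distance tables
-- (one pass per row/column), an asymptotic change in the worst case.

-- ===== PORT A =====
-- data[y][l] etc.; total forms are exact on Pre_ (rectangular grid ⇒ every index in range)
def pyAt (xs : List Int) (i : Int) : Int := PySem.List.pyGetD xs i 0
def rowAt (data : List (List Int)) (y : Int) : List Int := PySem.List.pyGetD data y []

-- Python's 'for i in idxs: if p i: <f i>; break / else: <els>'
def forElse (idxs : List Int) (p : Int → Bool) (f : Int → Int) (els : Int) : Int :=
  match idxs with
  | [] => els
  | i :: t => if p i then f i else forElse t p f els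

def cellScore (data : List (List Int)) (row : List Int) (y x tree : Int) : Int :=
  let score : Int := 1
  let score := score * forElse (PySem.List.pyRange (x - 1) (-1) (-1))
      (fun l => decide (tree ≤ pyAt (rowAt data y) l)) (fun l => x - l) x
  let score := score * forElse (PySem.List.pyRange (x + 1) (PySem.List.len row) 1)
      (fun r => decide (tree ≤ pyAt (rowAt data y) r)) (fun r => r - x) (PySem.List.len row - x - 1)
  let score := score * forElse (PySem.List.pyRange (y - 1) (-1) (-1))
      (fun u => decide (tree ≤ pyAt (rowAt data u) x)) (fun u => y - u) y
  let score := score * forElse (PySem.List.pyRange (y + 1) (PySem.List.len data) 1)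
      (fun d => decide (tree ≤ pyAt (rowAt data d) x)) (fun d => d - y) (PySem.List.len data - y - 1)
  score

def part_2 (data : List (List Int)) : Int :=
  (PySem.List.enumerate data).foldl (fun best yr =>
    (PySem.List.enumerate yr.2).foldl (fun best xt =>
      max (cellScore data yr.2 yr.1 xt.1 xt.2) best) best) 0

-- ===== PORT B =====
-- 'while stack and stack[-1][1] < h: stack.pop()'  (stack top at the HEAD of the list)
def popWhile (h : Int) : List (Int × Int) → List (Int × Int)
  | [] => []
  | (j, g) :: t => if g < h then popWhile h t else (j, g) :: t

-- one iteration of the loop body of dists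
def distsStep (so : List (Int × Int) × List Int) (ih : Int × Int) : List (Int × Int) × List Int :=
  let st := popWhile ih.2 so.1
  ((ih.1, ih.2) :: st,
   so.2 ++ [match st with | [] => ih.1 | (j, _) :: _ => ih.1 - j])

def dists (xs : List Int) : List Int :=
  ((PySem.List.enumerate xs).foldl distsStep ([], [])).2

def part_2_alt (data : List (List Int)) : Int :=
  if data = [] then 0
  else
    let w := PySem.List.len (data.headD [])
    let cols := (PySem.List.pyRange 0 w 1).map (fun x => data.map (fun row => PySem.List.pyGetD row x 0))
    let left := data.map dists
    let right := data.map (fun row => (dists row.reverse).reverse)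
    let up := cols.map dists
    let down := cols.map (fun col => (dists col.reverse).reverse)
    (PySem.List.enumerate data).foldl (fun best yr =>
      (PySem.List.pyRange 0 (PySem.List.len yr.2) 1).foldl (fun best x =>
        let s := PySem.List.pyGetD (PySem.List.pyGetD left yr.1 []) x 0
               * PySem.List.pyGetD (PySem.List.pyGetD right yr.1 []) x 0
               * PySem.List.pyGetD (PySem.List.pyGetD up x []) yr.1 0
               * PySem.List.pyGetD (PySem.List.pyGetD down x []) yr.1 0
        if s > best then s else best) best) 0

-- ===== PRECONDITION & SPEC =====
-- Pre_ excludes exactly the non-rectangular grids, on which A raises IndexError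
-- (the up/down column scans index a neighbouring row before any break can occur).
def Pre_part_2 (data : List (List Int)) : Prop :=
  ∀ row ∈ data, row.length = (data.headD []).length
instance (data : List (List Int)) : Decidable (Pre_part_2 data) := by unfold Pre_part_2; infer_instance

def pvWitness_part_2 : List (List Int) := [[3, 0, 3], [2, 5, 1], [6, 3, 2]]

def Spec_part_2 (data : List (List Int)) (out : Int) : Prop := out = part_2_alt data
instance (data : List (List Int)) (out : Int) : Decidable (Spec_part_2 data out) := by unfold Spec_part_2; infer_instance

-- ===== CLAIM (what is proved, stated in full; the proofs are below) =====
def Claim_equal_part_2 : Prop := ∀ (data : List (List Int)), Dom_part_2 data → Pre_part_2 data → Spec_part_2 data (part_2 data)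

-- ===== LEMMAS AND PROOFS =====

-- naive viewing distance: walk away from the tree through `prior` (nearest first),
-- counting steps, stopping at the first height ≥ tree
def vdist (tree : Int) : List Int → Int
  | [] => 0
  | h :: t => if tree ≤ h then 1 else 1 + vdist tree t

def query (st : List (Int × Int)) (i : Int) : Int :=
  match st with | [] => i | (j, _) :: _ => i - j

theorem popWhile_popWhile (g h : Int) (hgh : g ≤ h) (st : List (Int × Int)) :
    popWhile h (popWhile g st) = popWhile h st := by
  induction st with
  | nil => rfl
  | cons p t ih =>
    obtain ⟨j, a⟩ := p
    by_cases ha : a < g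
    · simp [popWhile, ha, ih, show a < h by omega]
    · by_cases hb : a < h
      · simp [popWhile, ha, hb]
      · simp [popWhile, ha, hb]

theorem query_succ (st : List (Int × Int)) (i : Int) :
    query st (i + 1) = query st i + 1 := by
  cases st with
  | nil => rfl
  | cons p t => obtain ⟨j, a⟩ := p; simp [query]; ring

theorem foldF_snoc (p : List Int) (g : Int) :
    (PySem.List.enumerate (p ++ [g])).foldl distsStep ([], []) =
    distsStep ((PySem.List.enumerate p).foldl distsStep ([], [])) ((p.length : Int), g) := by
  rw [show PySem.List.enumerate (p ++ [g]) = PySem.List.enumerate p ++ [((p.length : Int), g)] by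
    rw [PySem.List.enumerate_append]; simp [PySem.List.enumerate_cons, PySem.List.enumerate_nil]]
  rw [List.foldl_append]; rfl

theorem stack_query (p : List Int) (h : Int) :
    query (popWhile h ((PySem.List.enumerate p).foldl distsStep ([], [])).1) (p.length : Int)
      = vdist h p.reverse := by
  induction p using List.reverseRecOn with
  | nil => simp [PySem.List.enumerate_nil, query, popWhile, vdist]
  | append_singleton p g ih =>
    rw [foldF_snoc]
    simp only [distsStep]
    by_cases hg : g < h
    · rw [show popWhile h ((((p.length : Int), g)) :: popWhile g ((PySem.List.enumerate p).foldl distsStep ([], [])).1)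
          = popWhile h ((PySem.List.enumerate p).foldl distsStep ([], [])).1 by
        simp [popWhile, hg, popWhile_popWhile g h (le_of_lt hg)]]
      rw [show ((p ++ [g]).length : Int) = (p.length : Int) + 1 by simp]
      rw [query_succ, ih]
      simp [vdist, show ¬ h ≤ g by omega]
      omega
    · rw [show popWhile h ((((p.length : Int), g)) :: popWhile g ((PySem.List.enumerate p).foldl distsStep ([], [])).1)
          = (((p.length : Int), g)) :: popWhile g ((PySem.List.enumerate p).foldl distsStep ([], [])).1 by
        simp [popWhile, hg]]
      simp [query, vdist, show h ≤ g by omega]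

theorem dists_snoc (p : List Int) (g : Int) :
    dists (p ++ [g]) = dists p ++ [vdist g p.reverse] := by
  unfold dists
  rw [foldF_snoc]
  simp only [distsStep]
  congr 1
  rw [← stack_query p g]
  rfl

theorem length_dists (xs : List Int) : (dists xs).length = xs.length := by
  induction xs using List.reverseRecOn with
  | nil => rfl
  | append_singleton p g ih => rw [dists_snoc]; simp [ih]

theorem dists_eq (xs : List Int) :
    dists xs = (List.range xs.length).map (fun i => vdist (xs.getD i 0) ((xs.take i).reverse)) := by
  induction xs using List.reverseRecOn with
  | nil => rfl
  | append_singleton p g ih =>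
    rw [dists_snoc, ih]
    simp only [List.length_append, List.length_cons, List.length_nil, List.range_succ, List.map_append]
    congr 1
    · apply List.map_congr_left
      intro i hi
      rw [List.mem_range] at hi
      rw [List.getD_append _ _ _ _ (by omega), List.take_append_of_le_length (by omega)]
    · simp
theorem forElse_vdist (g f : Int → Int) (tree : Int) (idxs : List Int) (c els : Int)
    (hf : ∀ (k : Nat) (hk : k < idxs.length), f (idxs[k]) = c + k + 1)
    (hels : els = c + idxs.length) :
    forElse idxs (fun j => decide (tree ≤ g j)) f els = c + vdist tree (idxs.map g) := by
  induction idxs generalizing c els with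
  | nil => simpa [forElse, vdist] using hels
  | cons i t ih =>
    simp only [forElse, List.map_cons, vdist]
    by_cases hp : tree ≤ g i
    · simpa [hp] using hf 0 (by simp)
    · simp only [hp, decide_false, if_false, Bool.false_eq_true]
      rw [ih (c + 1) els (fun k hk => by
            have h2 := hf (k + 1) (by simpa using hk)
            simp only [List.getElem_cons_succ] at h2
            rw [h2]; push_cast; ring)
          (by simp at hels ⊢; omega)]
      ring

theorem map_pyRange_desc (v : List Int) (x : Nat) (hx : x ≤ v.length) :
    (PySem.List.pyRange ((x : Int) - 1) (-1) (-1)).map (fun l => pyAt v l) = (v.take x).reverse := by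
  have hxr : ((x : Int) - 1 - -1).toNat = x := by omega
  rw [PySem.List.pyRange_neg_one, List.map_map, hxr]
  apply List.ext_getElem
  · simp [List.length_take]; omega
  · intro k h1 h2
    simp only [List.length_map, List.length_range] at h1
    simp only [List.length_reverse, List.length_take] at h2
    simp only [List.getElem_map, List.getElem_range, Function.comp_apply, List.getElem_reverse,
      List.getElem_take]
    rw [pyAt, PySem.List.pyGetD_eq_getElem _ _ (by omega) (by omega)]
    congr 1
    simp only [List.length_take]
    omega

theorem len_pyRange_desc (x : Nat) :
    (PySem.List.pyRange ((x : Int) - 1) (-1) (-1)).length = x := by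
  rw [PySem.List.pyRange_neg_one]; simp

theorem getElem_pyRange_desc (x : Nat) (k : Nat) (hk : k < (PySem.List.pyRange ((x : Int) - 1) (-1) (-1)).length) :
    (PySem.List.pyRange ((x : Int) - 1) (-1) (-1))[k] = (x : Int) - 1 - k := by
  rw [List.getElem_of_eq (PySem.List.pyRange_neg_one ((x : Int) - 1) (-1))]
  simp
def colOf (data : List (List Int)) (x : Int) : List Int := data.map (fun r => pyAt r x)

theorem forElse_congr (idxs : List Int) (p q : Int → Bool) (f : Int → Int) (els : Int)
    (h : ∀ i ∈ idxs, p i = q i) : forElse idxs p f els = forElse idxs q f els := by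
  induction idxs with
  | nil => rfl
  | cons i t ih =>
    simp only [forElse, h i (by simp)]
    split
    · rfl
    · exact ih (fun j hj => h j (by simp [hj]))

theorem pyAt_col (data : List (List Int)) (x u : Int) (h0 : 0 ≤ u) (h1 : u < (data.length : Int)) :
    pyAt (rowAt data u) x = pyAt (colOf data x) u := by
  unfold colOf rowAt pyAt
  rw [PySem.List.pyGetD_eq_getElem _ _ h0 (by simpa using h1),
      PySem.List.pyGetD_eq_getElem _ _ h0 (by simpa using h1)]
  simp [PySem.List.pyGetD]

-- left-style scan (descending indices) over any list v
theorem scan_desc (v : List Int) (tree : Int) (x : Nat) (hx : x ≤ v.length) :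
    forElse (PySem.List.pyRange ((x : Int) - 1) (-1) (-1))
      (fun l => decide (tree ≤ pyAt v l)) (fun l => (x : Int) - l) (x : Int)
      = vdist tree ((v.take x).reverse) := by
  rw [forElse_vdist (pyAt v) _ tree _ 0 _
      (fun k hk => by rw [getElem_pyRange_desc x k hk]; rw [len_pyRange_desc] at hk; ring)
      (by rw [len_pyRange_desc]; ring)]
  rw [map_pyRange_desc v x hx, zero_add]

-- right-style scan (ascending indices) over any list v
theorem scan_asc (v : List Int) (tree : Int) (x : Nat) (hx : x < v.length) :
    forElse (PySem.List.pyRange ((x : Int) + 1) (PySem.List.len v) 1)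
      (fun r => decide (tree ≤ pyAt v r)) (fun r => r - (x : Int)) (PySem.List.len v - (x : Int) - 1)
      = vdist tree (v.drop (x + 1)) := by
  rw [forElse_vdist (pyAt v) _ tree _ 0 _
      (fun k hk => by rw [PySem.List.getElem_pyRange_one _ _ k hk]; ring)
      (by rw [PySem.List.length_pyRange_one]; simp [PySem.List.len_eq]; omega)]
  have : (PySem.List.pyRange ((x : Int) + 1) (PySem.List.len v) 1).map (fun j => pyAt v j)
      = v.drop ((x : Int) + 1).toNat := PySem.List.map_pyGetD_pyRange v 0 (by omega)
  rw [this, zero_add]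
  congr 1
theorem rowAt_nat (data : List (List Int)) (ky : Nat) (hy : ky < data.length) :
    rowAt data (ky : Int) = data[ky] := by
  unfold rowAt
  rw [PySem.List.pyGetD_natCast]
  exact List.getD_eq_getElem _ _ hy

theorem len_colOf (data : List (List Int)) (x : Int) :
    PySem.List.len data = PySem.List.len (colOf data x) := by
  simp [colOf, PySem.List.len_eq]

theorem cellScore_eq (data : List (List Int)) (ky kx : Nat) (hy : ky < data.length)
    (hx : kx < data[ky].length) :
    cellScore data data[ky] (ky : Int) (kx : Int) data[ky][kx] =
      vdist data[ky][kx] ((data[ky].take kx).reverse)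
      * vdist data[ky][kx] (data[ky].drop (kx + 1))
      * vdist data[ky][kx] (((colOf data (kx : Int)).take ky).reverse)
      * vdist data[ky][kx] ((colOf data (kx : Int)).drop (ky + 1)) := by
  have hrow := rowAt_nat data ky hy
  have h3 : forElse (PySem.List.pyRange ((ky : Int) - 1) (-1) (-1))
      (fun u => decide (data[ky][kx] ≤ pyAt (rowAt data u) (kx : Int)))
      (fun u => (ky : Int) - u) (ky : Int)
      = vdist data[ky][kx] (((colOf data (kx : Int)).take ky).reverse) := by
    rw [forElse_congr _ _ (fun u => decide (data[ky][kx] ≤ pyAt (colOf data (kx : Int)) u)) _ _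
        (fun i hi => by
          rw [PySem.List.mem_pyRange_neg_one] at hi
          rw [pyAt_col data _ i (by omega) (by omega)])]
    exact scan_desc _ _ ky (by simp [colOf]; omega)
  have h4 : forElse (PySem.List.pyRange ((ky : Int) + 1) (PySem.List.len data) 1)
      (fun u => decide (data[ky][kx] ≤ pyAt (rowAt data u) (kx : Int)))
      (fun u => u - (ky : Int)) (PySem.List.len data - (ky : Int) - 1)
      = vdist data[ky][kx] ((colOf data (kx : Int)).drop (ky + 1)) := by
    rw [forElse_congr _ _ (fun u => decide (data[ky][kx] ≤ pyAt (colOf data (kx : Int)) u)) _ _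
        (fun i hi => by
          rw [PySem.List.mem_pyRange_one] at hi
          rw [pyAt_col data _ i (by omega) (by simp [PySem.List.len_eq] at hi; omega)])]
    rw [len_colOf data (kx : Int)]
    exact scan_asc _ _ ky (by simp [colOf]; omega)
  simp only [cellScore, hrow]
  rw [h3, h4, scan_desc _ _ kx (le_of_lt hx), scan_asc _ _ kx hx, one_mul]
theorem dists_getD (xs : List Int) (k : Nat) (hk : k < xs.length) :
    (dists xs).getD k 0 = vdist xs[k] ((xs.take k).reverse) := by
  rw [dists_eq, PySem.List.getD_map_range _ _ _ _ hk, List.getD_eq_getElem _ _ hk]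

theorem dists_rev_getD (xs : List Int) (k : Nat) (hk : k < xs.length) :
    ((dists xs.reverse).reverse).getD k 0 = vdist xs[k] (xs.drop (k + 1)) := by
  have hlen : (dists xs.reverse).length = xs.length := by rw [length_dists, List.length_reverse]
  rw [List.getD_eq_getElem _ _ (by simp [hlen]; omega), List.getElem_reverse,
      List.getElem_of_eq (dists_eq xs.reverse), List.getElem_map, List.getElem_range]
  simp only [hlen]
  rw [List.getD_eq_getElem _ _ (by simp; omega), List.getElem_reverse, List.take_reverse,
      List.reverse_reverse]
  congr 1
  · congr 1; omega
  · congr 1; omega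

theorem colOf_length (data : List (List Int)) (x : Int) : (colOf data x).length = data.length := by
  simp [colOf]

theorem colOf_getElem (data : List (List Int)) (kx ky : Nat) (hy : ky < data.length)
    (hx : kx < data[ky].length) :
    (colOf data (kx : Int))[ky]'(by rw [colOf_length]; exact hy) = data[ky][kx] := by
  unfold colOf pyAt
  rw [List.getElem_map, PySem.List.pyGetD_natCast, List.getD_eq_getElem _ _ hx]

theorem tableL (data : List (List Int)) (ky kx : Nat) (hy : ky < data.length)
    (hx : kx < data[ky].length) :
    ((data.map dists).getD ky []).getD kx 0
      = vdist data[ky][kx] ((data[ky].take kx).reverse) := by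
  rw [List.getD_eq_getElem (data.map dists) _ (by simpa using hy), List.getElem_map,
      dists_getD _ _ hx]

theorem tableR (data : List (List Int)) (ky kx : Nat) (hy : ky < data.length)
    (hx : kx < data[ky].length) :
    ((data.map (fun row => (dists row.reverse).reverse)).getD ky []).getD kx 0
      = vdist data[ky][kx] (data[ky].drop (kx + 1)) := by
  rw [List.getD_eq_getElem (data.map (fun row => (dists row.reverse).reverse)) _ (by simpa using hy),
      List.getElem_map, dists_rev_getD _ _ hx]

theorem cols_length (data : List (List Int)) :
    ((PySem.List.pyRange 0 (PySem.List.len (data.headD [])) 1).map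
        (fun x => data.map (fun row => PySem.List.pyGetD row x 0))).length
      = (data.headD []).length := by
  rw [List.length_map, PySem.List.length_pyRange_one]
  simp [PySem.List.len_eq]

theorem cols_getElem (data : List (List Int)) (kx : Nat) (hW : kx < (data.headD []).length) :
    ((PySem.List.pyRange 0 (PySem.List.len (data.headD [])) 1).map
        (fun x => data.map (fun row => PySem.List.pyGetD row x 0)))[kx]'(by
          rw [cols_length]; exact hW)
      = colOf data (kx : Int) := by
  rw [List.getElem_map, PySem.List.getElem_pyRange_one _ _ _ (by
    rw [PySem.List.length_pyRange_one, PySem.List.len_eq]; omega)]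
  simp only [zero_add, colOf, pyAt]

theorem colsD_getD (data : List (List Int)) (kx : Nat) (hW : kx < (data.headD []).length) :
    (((PySem.List.pyRange 0 (PySem.List.len (data.headD [])) 1).map
        (fun x => data.map (fun row => PySem.List.pyGetD row x 0))).map dists).getD kx []
      = dists (colOf data (kx : Int)) := by
  rw [List.getD_eq_getElem _ _ (by rw [List.length_map, cols_length]; exact hW),
      List.getElem_map, cols_getElem data kx hW]

theorem colsRev_getD (data : List (List Int)) (kx : Nat) (hW : kx < (data.headD []).length) :
    (((PySem.List.pyRange 0 (PySem.List.len (data.headD [])) 1).map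
        (fun x => data.map (fun row => PySem.List.pyGetD row x 0))).map
          (fun col => (dists col.reverse).reverse)).getD kx []
      = (dists (colOf data (kx : Int)).reverse).reverse := by
  rw [List.getD_eq_getElem _ _ (by rw [List.length_map, cols_length]; exact hW),
      List.getElem_map, cols_getElem data kx hW]

theorem tableU (data : List (List Int)) (ky kx : Nat) (hy : ky < data.length)
    (hx : kx < data[ky].length) (hW : kx < (data.headD []).length) :
    ((((PySem.List.pyRange 0 (PySem.List.len (data.headD [])) 1).map
        (fun x => data.map (fun row => PySem.List.pyGetD row x 0))).map dists).getD kx []).getD ky 0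
      = vdist data[ky][kx] (((colOf data (kx : Int)).take ky).reverse) := by
  rw [colsD_getD data kx hW, dists_getD _ _ (by rw [colOf_length]; exact hy),
      colOf_getElem data kx ky hy hx]

theorem tableD (data : List (List Int)) (ky kx : Nat) (hy : ky < data.length)
    (hx : kx < data[ky].length) (hW : kx < (data.headD []).length) :
    ((((PySem.List.pyRange 0 (PySem.List.len (data.headD [])) 1).map
        (fun x => data.map (fun row => PySem.List.pyGetD row x 0))).map
          (fun col => (dists col.reverse).reverse)).getD kx []).getD ky 0
      = vdist data[ky][kx] ((colOf data (kx : Int)).drop (ky + 1)) := by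
  rw [colsRev_getD data kx hW, dists_rev_getD _ _ (by rw [colOf_length]; exact hy),
      colOf_getElem data kx ky hy hx]
theorem if_gt_eq_max (s b : Int) : (if s > b then s else b) = max s b := by omega

theorem part_2_spec : Claim_equal_part_2 := by
  unfold Claim_equal_part_2
  intro data _hdom hpre
  unfold Spec_part_2
  by_cases hdata : data = []
  · subst hdata; rfl
  · unfold part_2 part_2_alt
    rw [if_neg hdata]
    apply PySem.List.foldl_congr_mem
    intro best yr hyr
    rw [PySem.List.mem_enumerate_iff] at hyr
    obtain ⟨ky, hky, rfl⟩ := hyr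
    simp only [zero_add]
    rw [PySem.List.enumerate_eq_map_pyRange data[ky] 0, List.foldl_map]
    apply PySem.List.foldl_congr_mem
    intro acc x hx
    rw [PySem.List.mem_pyRange_one] at hx
    obtain ⟨kx, rfl⟩ : ∃ kx : Nat, x = (kx : Int) := ⟨x.toNat, by omega⟩
    have hkx : kx < data[ky].length := by
      simp only [PySem.List.len_eq] at hx; exact_mod_cast hx.2
    have hW : kx < (data.headD []).length := by
      rw [← hpre data[ky] (List.getElem_mem hky)]; exact hkx
    simp only [PySem.List.pyGetD_natCast, List.getD_eq_getElem data[ky] 0 hkx]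
    rw [cellScore_eq data ky kx hky hkx]
    rw [tableL data ky kx hky hkx, tableR data ky kx hky hkx,
        tableU data ky kx hky hkx hW, tableD data ky kx hky hkx hW, if_gt_eq_max]
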